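-- pv_equiv track=rewrite | github.com/markusstrasser/skills | shared/git_context.py | _split_diff_chunks
-- ===== SOURCE A (Python) =====
-- def _split_diff_chunks(diff_text: str) -> list[str]:
--     lines = diff_text.splitlines()
--     if not lines:
--         return []
--     chunks: list[list[str]] = []
--     current: list[str] = []
--     for line in lines:
--         if line.startswith("diff --git ") and current:
--             chunks.append(current)
--             current = [line]
--             continue
--         current.append(line)
--     if current:
--         chunks.append(current)
--     return ["\n".join(chunk) for chunk in chunks]
-- ===== SOURCE B (Python) =====
-- def _split_diff_chunks(diff_text: str) -> list[str]:
--     # Single right-to-left pass: cut happens exactly before a "diff --git " line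
--     # that has something above it, i.e. whenever the chunk below starts with one.
--     chunks: list[list[str]] = []
--     for line in reversed(diff_text.splitlines()):
--         if chunks and chunks[0][0].startswith("diff --git "):
--             chunks.insert(0, [line])
--         elif chunks:
--             chunks[0].insert(0, line)
--         else:
--             chunks = [[line]]
--     return ["\n".join(c) for c in chunks]
-- ===== Notes on version B (the rewrite author's own statement) =====
-- stated objective: alternative
-- what changed: Replaces A's left-to-right accumulator (current chunk, mid-loop flush, final flush, empty-input guard) with a single right-to-left pass that builds the chunk list back-to-front, cutting exactly before each 'diff --git ' line that has content above it; no guard or flush needed.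
import Mathlib
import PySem

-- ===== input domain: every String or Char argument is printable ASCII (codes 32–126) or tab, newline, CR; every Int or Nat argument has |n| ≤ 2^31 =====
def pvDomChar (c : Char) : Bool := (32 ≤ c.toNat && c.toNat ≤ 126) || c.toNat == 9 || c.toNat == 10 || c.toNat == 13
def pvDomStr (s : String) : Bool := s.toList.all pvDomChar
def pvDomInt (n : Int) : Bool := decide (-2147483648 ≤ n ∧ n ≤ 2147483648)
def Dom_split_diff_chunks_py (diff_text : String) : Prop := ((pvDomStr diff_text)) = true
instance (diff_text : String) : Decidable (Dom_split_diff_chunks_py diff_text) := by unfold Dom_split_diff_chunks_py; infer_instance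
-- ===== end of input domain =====

-- B replaces A's left-to-right accumulator (current chunk + final flush + empty guard) by a
-- single right-to-left pass that builds the chunk list back-to-front; objective: alternative.

-- ===== PORT A =====
-- loop body of A: state is (chunks, current)
def pvStepA (s : List (List String) × List String) (line : String) :
    List (List String) × List String :=
  if PySem.Str.startswith line "diff --git " && !s.2.isEmpty then
    (s.1 ++ [s.2], [line])
  else
    (s.1, s.2 ++ [line])

def split_diff_chunks_py (diff_text : String) : List String :=
  let lines := PySem.Str.splitlines diff_text
  if lines.isEmpty then []
  else
    let st := lines.foldl pvStepA ([], [])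
    let chunks := if st.2.isEmpty then st.1 else st.1 ++ [st.2]
    chunks.map (fun c => PySem.Str.join "\n" c)

-- ===== PORT B =====
-- loop body of B: prepend `line`; a cut lies before the chunk below iff that chunk
-- starts with a "diff --git " line.  chunks[0][0] is ported as headI: the first chunk
-- is never empty by construction, so headI is exact here.
def pvStepB (chunks : List (List String)) (line : String) : List (List String) :=
  match chunks with
  | c :: cs =>
      if PySem.Str.startswith c.headI "diff --git " then [line] :: c :: cs
      else (line :: c) :: cs
  | [] => [[line]]

def split_diff_chunks_py_alt (diff_text : String) : List String :=
  let chunks := (PySem.Str.splitlines diff_text).reverse.foldl pvStepB []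
  chunks.map (fun c => PySem.Str.join "\n" c)

-- ===== PRECONDITION & SPEC =====
def Spec_split_diff_chunks_py (diff_text : String) (out : List String) : Prop := out = split_diff_chunks_py_alt diff_text
instance (diff_text : String) (out : List String) : Decidable (Spec_split_diff_chunks_py diff_text out) := by unfold Spec_split_diff_chunks_py; infer_instance

-- ===== CLAIM (what is proved, stated in full; the proofs are below) =====
def Claim_equal_split_diff_chunks_py : Prop := ∀ (diff_text : String), Dom_split_diff_chunks_py diff_text → Spec_split_diff_chunks_py diff_text (split_diff_chunks_py diff_text)

-- ===== LEMMAS AND PROOFS =====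

-- reference form of A's loop once `current` is nonempty
def pvConsume (cur : List String) : List String → List (List String)
  | [] => [cur]
  | l :: ls =>
      if PySem.Str.startswith l "diff --git " then cur :: pvConsume [l] ls
      else pvConsume (cur ++ [l]) ls

-- how a pending (nonempty) first chunk merges with B's result for the suffix
def pvMerge (cur : List String) (r : List (List String)) : List (List String) :=
  match r with
  | [] => [cur]
  | c :: cs =>
      if PySem.Str.startswith c.headI "diff --git " then cur :: c :: cs
      else (cur ++ c) :: cs

def pvFinalize (s : List (List String) × List String) : List (List String) :=
  if s.2.isEmpty then s.1 else s.1 ++ [s.2]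

theorem pvFoldA_consume (ls : List String) :
    ∀ (chunks : List (List String)) (cur : List String), cur ≠ [] →
      pvFinalize (ls.foldl pvStepA (chunks, cur)) = chunks ++ pvConsume cur ls := by
  induction ls with
  | nil =>
      intro chunks cur h
      simp [pvFinalize, pvConsume, h]
  | cons l ls ih =>
      intro chunks cur h
      have hcur : cur.isEmpty = false := by simp [h]
      by_cases hb : PySem.Str.startswith l "diff --git " = true
      · have hb' := hb
        simp at hb'
        have hstep : pvStepA (chunks, cur) l = (chunks ++ [cur], [l]) := by
          simp [pvStepA, hcur, hb']
        rw [List.foldl_cons, hstep, ih _ [l] (by simp), pvConsume, if_pos hb]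
        simp
      · have hb' := hb
        simp at hb'
        have hstep : pvStepA (chunks, cur) l = (chunks, cur ++ [l]) := by
          simp [pvStepA, hb']
        rw [List.foldl_cons, hstep, ih _ (cur ++ [l]) (by simp), pvConsume, if_neg hb]

theorem pvMerge_single (l : String) (r : List (List String)) :
    pvMerge [l] r = pvStepB r l := by
  cases r with
  | nil => simp [pvMerge, pvStepB]
  | cons c cs =>
      simp only [pvMerge, pvStepB]
      split_ifs <;> simp

theorem pvConsume_merge (ls : List String) :
    ∀ cur : List String,
      pvConsume cur ls = pvMerge cur (ls.foldr (fun line acc => pvStepB acc line) []) := by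
  induction ls with
  | nil => intro cur; simp [pvConsume, pvMerge]
  | cons l ls ih =>
      intro cur
      simp only [List.foldr_cons]
      set r := ls.foldr (fun line acc => pvStepB acc line) [] with hr
      by_cases hb : PySem.Str.startswith l "diff --git " = true
      · have hb' := hb
        simp at hb'
        rw [pvConsume, if_pos hb, ih [l], pvMerge_single]
        cases r with
        | nil => simp [pvStepB, pvMerge, hb']
        | cons c cs =>
            simp only [pvStepB]
            split_ifs <;> simp [pvMerge, hb']
      · have hb' := hb
        simp at hb'
        rw [pvConsume, if_neg hb, ih (cur ++ [l])]
        cases r with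
        | nil => simp [pvStepB, pvMerge, hb']
        | cons c cs =>
            simp only [pvStepB]
            split_ifs with hc <;>
              · have hc' := hc
                simp at hc'
                simp [pvMerge, hb', hc']

-- ===== VERDICT (by name: the statement is the Claim_ definition above) =====
theorem split_diff_chunks_py_spec : Claim_equal_split_diff_chunks_py := by
  intro diff_text _
  unfold Spec_split_diff_chunks_py split_diff_chunks_py split_diff_chunks_py_alt
  rw [List.foldl_reverse]
  cases hls : PySem.Str.splitlines diff_text with
  | nil => simp
  | cons l ls =>
      simp only [List.isEmpty_cons, if_neg (by simp : ¬(false = true))]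
      have h0 : List.foldl pvStepA ([], []) (l :: ls) = List.foldl pvStepA ([], [l]) ls := by
        simp [pvStepA]
      have h1 : pvFinalize (List.foldl pvStepA ([], [l]) ls) = pvConsume [l] ls :=
        pvFoldA_consume ls [] [l] (by simp)
      have h2 : pvConsume [l] ls
          = pvStepB (ls.foldr (fun line acc => pvStepB acc line) []) l := by
        rw [pvConsume_merge, pvMerge_single]
      have : (if (List.foldl pvStepA ([], []) (l :: ls)).2.isEmpty = true
            then (List.foldl pvStepA ([], []) (l :: ls)).1
            else (List.foldl pvStepA ([], []) (l :: ls)).1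
              ++ [(List.foldl pvStepA ([], []) (l :: ls)).2])
          = (l :: ls).foldr (fun line acc => pvStepB acc line) [] := by
        rw [h0]
        have := h1
        unfold pvFinalize at this
        rw [this, h2]
        simp
      rw [this]
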